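-- pv_equiv track=rewrite | github.com/sammmmmm099/cr | crunchyroll.py | find_guid_by_locale
-- ===== SOURCE A (Python) =====
-- def find_guid_by_locale(data, locale):
--     """Find the GUID for the specified locale, fallback to en-US if not found"""
--     en_us_guid = None
--     for version in data["versions"]:
--         if version["audio_locale"] == locale:
--             return version["guid"]
--         if version["audio_locale"] == "en-US":
--             en_us_guid = version["guid"]
--     return en_us_guid
-- ===== SOURCE B (Python) =====
-- def find_guid_by_locale(data, locale):
--     """Find the GUID for the specified locale, fallback to en-US if not found"""
--     versions = data["versions"]
--     for version in versions:
--         if version["audio_locale"] == locale: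
--             return version["guid"]
--     for version in reversed(versions):
--         if version["audio_locale"] == "en-US":
--             return version["guid"]
--     return None
-- ===== Notes on version B (the rewrite author's own statement) =====
-- stated objective: alternative
-- what changed: Replaces A's single pass with a threaded en-US accumulator by two independent first-match scans: a forward scan for the requested locale, then a backward scan over reversed(versions) whose first en-US hit is A's last-assigned fallback.
import Mathlib
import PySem

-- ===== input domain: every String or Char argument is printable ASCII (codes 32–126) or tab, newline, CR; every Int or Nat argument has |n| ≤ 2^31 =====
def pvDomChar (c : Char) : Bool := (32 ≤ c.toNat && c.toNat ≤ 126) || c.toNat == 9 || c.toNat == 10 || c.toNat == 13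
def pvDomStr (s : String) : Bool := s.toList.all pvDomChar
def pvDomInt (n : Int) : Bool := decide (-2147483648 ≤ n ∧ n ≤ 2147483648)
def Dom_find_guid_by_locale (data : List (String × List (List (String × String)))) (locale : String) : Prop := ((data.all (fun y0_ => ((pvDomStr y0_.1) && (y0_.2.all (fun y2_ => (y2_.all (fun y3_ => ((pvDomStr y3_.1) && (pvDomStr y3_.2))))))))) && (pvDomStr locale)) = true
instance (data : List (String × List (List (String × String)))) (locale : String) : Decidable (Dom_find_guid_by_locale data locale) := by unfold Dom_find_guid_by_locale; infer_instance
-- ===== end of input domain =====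

-- B replaces A's single pass (threaded en-US accumulator) by two independent first-match
-- scans: forward for `locale`, then backward (reversed list) for the "en-US" fallback.
-- ===== PORT A =====
-- Python raises (KeyError) on missing keys; the assoc-list lookup returns none there, which
-- this port threads as a no-match / none result — exact on Pre_, where A reads no missing key.
def findGuidLoopA (locale : String) : List (List (String × String)) → Option String → Option String
  | [], acc => acc
  | v :: rest, acc =>
    if (List.lookup "audio_locale" v) == some locale then (List.lookup "guid" v)
    else if (List.lookup "audio_locale" v) == some "en-US" then
      findGuidLoopA locale rest ((List.lookup "guid" v))
    else findGuidLoopA locale rest acc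

def find_guid_by_locale (data : List (String × List (List (String × String)))) (locale : String) : Option String :=
  findGuidLoopA locale (((List.lookup "versions" data)).getD []) none

-- ===== PORT B =====
def find_guid_by_locale_alt (data : List (String × List (List (String × String)))) (locale : String) : Option String :=
  let versions := ((List.lookup "versions" data)).getD []
  match versions.find? (fun v => (List.lookup "audio_locale" v) == some locale) with
  | some v => (List.lookup "guid" v)
  | none =>
    match versions.reverse.find? (fun v => (List.lookup "audio_locale" v) == some "en-US") with
    | some v => (List.lookup "guid" v)
    | none => none

-- ===== PRECONDITION & SPEC =====
-- Python A raises KeyError when data lacks "versions", when a version dict scanned before the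
-- first locale match lacks "audio_locale" (or is en-US without "guid"), or when the first
-- locale-matching version lacks "guid"; Pre_ is exactly A's raise-free set.
def Pre_find_guid_by_locale (data : List (String × List (List (String × String)))) (locale : String) : Prop :=
  ((List.lookup "versions" data)).isSome = true ∧
  (∀ v ∈ ((List.lookup "versions" data)).getD [] |>.takeWhile
      (fun v => !((List.lookup "audio_locale" v) == some locale)),
    ((List.lookup "audio_locale" v)).isSome = true ∧
    ((List.lookup "audio_locale" v) = some "en-US" → ((List.lookup "guid" v)).isSome = true)) ∧
  (∀ v, (((List.lookup "versions" data)).getD []).find?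
      (fun v => (List.lookup "audio_locale" v) == some locale) = some v →
    ((List.lookup "guid" v)).isSome = true)
instance (data : List (String × List (List (String × String)))) (locale : String) : Decidable (Pre_find_guid_by_locale data locale) := by unfold Pre_find_guid_by_locale; infer_instance
def pvWitness_find_guid_by_locale : (List (String × List (List (String × String)))) × String :=
  ([("versions", [[("audio_locale", "en-US"), ("guid", "g1")], [("audio_locale", "fr-FR"), ("guid", "g2")]])], "fr-FR")
def Spec_find_guid_by_locale (data : List (String × List (List (String × String)))) (locale : String) (out : Option String) : Prop := out = find_guid_by_locale_alt data locale
instance (data : List (String × List (List (String × String)))) (locale : String) (out : Option String) : Decidable (Spec_find_guid_by_locale data locale out) := by unfold Spec_find_guid_by_locale; infer_instance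

-- ===== CLAIM (what is proved, stated in full; the proofs are below) =====
def Claim_equal_find_guid_by_locale : Prop := ∀ (data : List (String × List (List (String × String)))) (locale : String), Dom_find_guid_by_locale data locale → Pre_find_guid_by_locale data locale → Spec_find_guid_by_locale data locale (find_guid_by_locale data locale)

-- ===== LEMMAS AND PROOFS =====
theorem findGuidLoopA_eq (locale : String) (vs : List (List (String × String))) (acc : Option String) :
    findGuidLoopA locale vs acc =
      match vs.find? (fun v => (List.lookup "audio_locale" v) == some locale) with
      | some v => (List.lookup "guid" v)
      | none =>
        match vs.reverse.find? (fun v => (List.lookup "audio_locale" v) == some "en-US") with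
        | some v => (List.lookup "guid" v)
        | none => acc := by
  induction vs generalizing acc with
  | nil => simp [findGuidLoopA]
  | cons v rest ih =>
    by_cases hl : ((List.lookup "audio_locale" v) == some locale) = true
    · simp [findGuidLoopA, hl, List.find?]
    · by_cases hu : ((List.lookup "audio_locale" v) == some "en-US") = true
      · simp only [findGuidLoopA, hl, hu, if_false, if_true, List.reverse_cons,
          List.find?_cons, List.find?_append, ih]
        cases rest.find? (fun v => (List.lookup "audio_locale" v) == some locale) <;>
          cases h : rest.reverse.find? (fun v => (List.lookup "audio_locale" v) == some "en-US") <;>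
          simp [h, List.find?]
      · simp only [findGuidLoopA, hl, hu, if_false, List.reverse_cons,
          List.find?_cons, List.find?_append, ih]
        cases rest.find? (fun v => (List.lookup "audio_locale" v) == some locale) <;>
          cases h : rest.reverse.find? (fun v => (List.lookup "audio_locale" v) == some "en-US") <;>
          simp [h, List.find?]


-- ===== VERDICT (by name: the statement is the Claim_ definition above) =====
theorem find_guid_by_locale_spec : Claim_equal_find_guid_by_locale := by
  intro data locale _ _
  unfold Spec_find_guid_by_locale find_guid_by_locale find_guid_by_locale_alt
  exact findGuidLoopA_eq locale _ none
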